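-- pv_equiv track=rewrite | github.com/RoyTurk/MATH-454 | lecture_06/poisson/poisson.py | assign_rows_to_processors
-- ===== SOURCE A (Python) =====
-- def assign_rows_to_processors(N, psize):
--     if (psize == 1):
--         start_rows, num_rank_cells = [0], [N]
--     else:
--         start_rows, num_rank_cells = [], []
--         N_loc = N // psize
--         start_rows.append(0)
--         num_rank_cells.append(N_loc)
--         i0 = N_loc
--         for _ in range(1, psize-1):
--             start_rows.append(i0)
--             num_rank_cells.append(N_loc)
--             i0 += N_loc
--         start_rows.append(i0)
--         num_rank_cells.append(N-i0)
--
--     return start_rows, num_rank_cells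
-- ===== SOURCE B (Python) =====
-- def assign_rows_to_processors(N, psize):
--     chunk = N // psize
--     bounds = [0]
--     for _ in range(psize - 1):
--         bounds.append(bounds[-1] + chunk)
--     bounds.append(N)
--     return bounds[:-1], [bounds[k + 1] - bounds[k] for k in range(psize)]
-- ===== Notes on version B (the rewrite author's own statement) =====
-- stated objective: alternative
-- what changed: B uses a boundary (fencepost) representation: it builds one list of psize+1 row boundaries ending in N, then derives start_rows as the boundary prefix and num_rank_cells as consecutive boundary differences, instead of A's two parallel lists with a running offset, special-cased first/last appends and a psize==1 branch.
-- outside the precondition, e.g. on assign_rows_to_processors(10, -3): A returns ([0, -4], [-4, 14]), B returns ([0], [])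
import Mathlib
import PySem

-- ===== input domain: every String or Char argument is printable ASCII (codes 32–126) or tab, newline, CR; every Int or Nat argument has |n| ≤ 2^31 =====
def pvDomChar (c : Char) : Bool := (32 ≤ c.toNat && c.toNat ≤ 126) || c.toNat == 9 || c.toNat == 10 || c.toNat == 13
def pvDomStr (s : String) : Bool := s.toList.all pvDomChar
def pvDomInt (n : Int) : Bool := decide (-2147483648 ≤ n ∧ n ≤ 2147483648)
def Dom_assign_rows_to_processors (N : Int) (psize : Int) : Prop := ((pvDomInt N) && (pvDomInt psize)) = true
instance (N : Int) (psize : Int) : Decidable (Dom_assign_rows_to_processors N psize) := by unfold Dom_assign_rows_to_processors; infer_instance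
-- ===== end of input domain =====

-- B replaces A's two parallel lists with a running offset and a psize==1 branch by a single
-- boundary (fencepost) list; starts are its prefix and counts its consecutive differences
-- (objective: alternative representation of the same partition).

-- ===== PORT A =====
def assign_rows_to_processors (N : Int) (psize : Int) : List Int × List Int :=
  if psize == 1 then ([0], [N])
  else
    let N_loc := PySem.Int.floordiv N psize
    let st := (PySem.List.pyRange 1 (psize - 1) 1).foldl
      (fun (acc : (List Int × List Int) × Int) _ =>
        ((acc.1.1 ++ [acc.2], acc.1.2 ++ [N_loc]), acc.2 + N_loc))
      (([0], [N_loc]), N_loc)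
    (st.1.1 ++ [st.2], st.1.2 ++ [N - st.2])

-- ===== PORT B =====
-- bounds[-1] and bounds[k]/bounds[k+1] are ported with pyGetD (default 0); under
-- Pre_ (1 ≤ psize) every such index is always in range, so the default never fires.
def assign_rows_to_processors_alt (N : Int) (psize : Int) : List Int × List Int :=
  let chunk := PySem.Int.floordiv N psize
  let bounds := (PySem.List.pyRange 0 (psize - 1) 1).foldl
    (fun b _ => b ++ [PySem.List.pyGetD b (-1) 0 + chunk]) [0]
  let bounds2 := bounds ++ [N]
  (PySem.List.slice bounds2 none (some (-1)),
   (PySem.List.pyRange 0 psize 1).map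
     (fun k => PySem.List.pyGetD bounds2 (k + 1) 0 - PySem.List.pyGetD bounds2 k 0))

-- ===== PRECONDITION & SPEC =====
-- Pre_ excludes psize = 0 (Python A raises ZeroDivisionError) and psize < 0, which lies
-- outside the task's natural domain of a positive processor count (A there returns an
-- accidental two-block value from its dead loop; B returns a different degenerate value).
def Pre_assign_rows_to_processors (N : Int) (psize : Int) : Prop := 1 ≤ psize
instance (N : Int) (psize : Int) : Decidable (Pre_assign_rows_to_processors N psize) := by unfold Pre_assign_rows_to_processors; infer_instance
def pvWitness_assign_rows_to_processors : Int × Int := (10, 3)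

def Spec_assign_rows_to_processors (N : Int) (psize : Int) (out : List Int × List Int) : Prop := out = assign_rows_to_processors_alt N psize
instance (N : Int) (psize : Int) (out : List Int × List Int) : Decidable (Spec_assign_rows_to_processors N psize out) := by unfold Spec_assign_rows_to_processors; infer_instance

-- ===== CLAIM (what is proved, stated in full; the proofs are below) =====
def Claim_equal_assign_rows_to_processors : Prop := ∀ (N : Int) (psize : Int), Dom_assign_rows_to_processors N psize → Pre_assign_rows_to_processors N psize → Spec_assign_rows_to_processors N psize (assign_rows_to_processors N psize)

-- ===== LEMMAS AND PROOFS =====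

-- Common closed form: with m+1 blocks of nominal size c, starts are j*c and counts are
-- m blocks of c plus the remainder N - m*c.
def pvClosed (c : Int) (m : Nat) (N : Int) : List Int × List Int :=
  ((List.range (m + 1)).map (fun j : Nat => (j : Int) * c),
   List.replicate m c ++ [N - (m : Int) * c])

-- A's fold, run over any list, appends closed-form blocks to its state.
theorem pv_fold_closed {α : Type} (c : Int) :
    ∀ (L : List α) (xs ys : List Int) (i0 : Int),
      L.foldl (fun (acc : (List Int × List Int) × Int) _ =>
          ((acc.1.1 ++ [acc.2], acc.1.2 ++ [c]), acc.2 + c)) ((xs, ys), i0)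
      = ((xs ++ (List.range L.length).map (fun j : Nat => i0 + (j : Int) * c),
          ys ++ List.replicate L.length c), i0 + (L.length : Int) * c) := by
  intro L
  induction L with
  | nil => intro xs ys i0; simp
  | cons a t ih =>
      intro xs ys i0
      rw [List.foldl_cons, ih]
      refine Prod.ext (Prod.ext ?_ ?_) ?_
      · simp only [List.length_cons, List.range_succ_eq_map, List.map_cons, List.map_map,
          List.append_assoc, List.cons_append, List.nil_append]
        congr 2
        · ring
        · apply List.map_congr_left; intro j _; simp [Function.comp]; ring
      · simp [List.replicate_succ]
      · simp only [List.length_cons]; push_cast; ring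

theorem pv_range_map (c : Int) :
    ∀ (k : Nat), (List.range (k + 2)).map (fun j : Nat => ((j : Int)) * c)
      = 0 :: ((List.range k).map (fun j : Nat => c + (j : Int) * c) ++ [c + (k : Int) * c]) := by
  intro k
  induction k with
  | zero => simp [List.range_succ]
  | succ n ih =>
      have h3 : n + 1 + 2 = (n + 2) + 1 := by omega
      rw [h3, List.range_succ, List.map_append, ih, List.range_succ, List.map_append]
      simp only [List.map_cons, List.map_nil, List.cons_append, List.append_assoc]
      congr 3
      · push_cast; ring

-- A equals the closed form on psize ≥ 1.
theorem pv_A_closed (N psize : Int) (h : 1 ≤ psize) :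
    assign_rows_to_processors N psize
      = pvClosed (PySem.Int.floordiv N psize) (psize - 1).toNat N := by
  unfold assign_rows_to_processors pvClosed
  by_cases h1 : psize = 1
  · subst h1; simp
  · have h2 : 2 ≤ psize := by omega
    obtain ⟨k, hk⟩ : ∃ k : Nat, psize = (k : Int) + 2 := ⟨(psize - 2).toNat, by omega⟩
    have hbeq : (psize == 1) = false := by simpa using h1
    rw [hbeq]
    simp only [Bool.false_eq_true, if_false]
    set c := PySem.Int.floordiv N psize with hc
    have hlen : (PySem.List.pyRange 1 (psize - 1) 1).length = k := by
      rw [PySem.List.length_pyRange_one]; omega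
    rw [pv_fold_closed c (PySem.List.pyRange 1 (psize - 1) 1) [0] [c] c, hlen]
    have hm : (psize - 1).toNat = k + 1 := by omega
    rw [hm, pv_range_map c k]
    refine Prod.ext ?_ ?_
    · simp
    · have hval : N - ((k : Int) + 1) * c = N - (c + (k : Int) * c) := by ring
      simp [List.replicate_succ, hval]

-- B's fold builds the boundary list in closed form.
theorem pv_bfold_closed {α : Type} (c : Int) :
    ∀ (L : List α) (b : List Int) (hb : b ≠ []),
      L.foldl (fun b _ => b ++ [PySem.List.pyGetD b (-1) 0 + c]) b
      = b ++ (List.range L.length).map (fun j : Nat => b.getLast hb + ((j : Int) + 1) * c) := by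
  intro L
  induction L with
  | nil => intro b hb; simp
  | cons a t ih =>
      intro b hb
      have hb' : b ++ [b.getLast hb + c] ≠ [] := by simp
      rw [List.foldl_cons, PySem.List.pyGetD_neg_one b 0 hb, ih _ hb']
      have hlast : (b ++ [b.getLast hb + c]).getLast hb' = b.getLast hb + c := by
        simp
      rw [hlast]
      simp only [List.length_cons, List.range_succ_eq_map, List.map_cons, List.map_map,
        List.append_assoc, List.cons_append, List.nil_append]
      congr 2
      · ring
      · apply List.map_congr_left; intro j _
        simp only [Function.comp_apply]
        push_cast; ring

-- B equals the closed form on psize ≥ 1.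
theorem pv_B_closed (N psize : Int) (h : 1 ≤ psize) :
    assign_rows_to_processors_alt N psize
      = pvClosed (PySem.Int.floordiv N psize) (psize - 1).toNat N := by
  simp only [assign_rows_to_processors_alt, pvClosed]
  set c := PySem.Int.floordiv N psize with hc
  obtain ⟨m, hm⟩ : ∃ m : Nat, psize = (m : Int) + 1 := ⟨(psize - 1).toNat, by omega⟩
  have hmt : (psize - 1).toNat = m := by omega
  have hlen : (PySem.List.pyRange 0 (psize - 1) 1).length = m := by
    rw [PySem.List.length_pyRange_one]; omega
  have hnil : ([0] : List Int) ≠ [] := by simp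
  rw [pv_bfold_closed c (PySem.List.pyRange 0 (psize - 1) 1) [0] hnil, hlen]
  have hbounds : ([0] : List Int) ++ (List.range m).map
      (fun j : Nat => ([0] : List Int).getLast hnil + ((j : Int) + 1) * c)
      = (List.range (m + 1)).map (fun j : Nat => (j : Int) * c) := by
    rw [List.range_succ_eq_map, List.map_cons, List.map_map]
    simp only [List.getLast_singleton, List.singleton_append]
    congr 1
    · simp
    · apply List.map_congr_left; intro j _
      simp only [List.getLast_singleton, Function.comp_apply]
      push_cast; ring
  rw [hbounds, hmt]
  set B2 := (List.range (m + 1)).map (fun j : Nat => (j : Int) * c) ++ [N] with hB2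
  have hB2len : B2.length = m + 2 := by simp [hB2]
  refine Prod.ext ?_ ?_
  · rw [PySem.List.slice_to_neg_one]
    simp [hB2]
  · -- counts
    have hrange : PySem.List.pyRange 0 psize 1
        = (List.range (m + 1)).map (fun j : Nat => (j : Int)) := by
      rw [hm]
      have : ((m : Int) + 1) = ((m + 1 : Nat) : Int) := by push_cast; ring
      rw [this, PySem.List.pyRange_zero_natCast]
    rw [hrange, List.map_map]
    have hget : ∀ j : Nat, j ≤ m + 1 → PySem.List.pyGetD B2 (j : Int) 0
        = if j = m + 1 then N else (j : Int) * c := by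
      intro j hj
      rw [PySem.List.pyGetD_natCast]
      by_cases hje : j = m + 1
      · subst hje
        rw [if_pos rfl]
        show (B2[m + 1]?).getD 0 = N
        rw [hB2, List.getElem?_append_right (by simp)]
        simp
      · have hjlt : j < m + 1 := by omega
        rw [if_neg hje]
        show (B2[j]?).getD 0 = (j : Int) * c
        rw [hB2, List.getElem?_append_left (by simp [hjlt]), List.getElem?_map]
        simp [hjlt]
    rw [List.range_succ, List.map_append]
    refine congrArg₂ _ ?_ ?_
    · rw [List.eq_replicate_iff]
      refine ⟨by simp, ?_⟩
      intro x hx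
      simp only [List.mem_map, List.mem_range] at hx
      obtain ⟨j, hjm, hjx⟩ := hx
      have e1 : ((j : Int) + 1) = ((j + 1 : Nat) : Int) := by push_cast; ring
      rw [Function.comp_apply, e1, hget (j + 1) (by omega), hget j (by omega)] at hjx
      have hne1 : ¬ (j + 1 = m + 1) := by omega
      have hne2 : ¬ (j = m + 1) := by omega
      rw [if_neg hne1, if_neg hne2] at hjx
      rw [← hjx]; push_cast; ring
    · simp only [List.map_cons, List.map_nil, Function.comp_apply]
      have e1 : ((m : Int) + 1) = ((m + 1 : Nat) : Int) := by push_cast; ring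
      rw [e1, hget (m + 1) (by omega), hget m (by omega)]
      rw [if_pos rfl, if_neg (by omega)]

-- ===== VERDICT (by name: the statement is the Claim_ definition above) =====
theorem assign_rows_to_processors_spec : Claim_equal_assign_rows_to_processors := by
  intro N psize _ hpre
  unfold Spec_assign_rows_to_processors
  rw [pv_A_closed N psize hpre, pv_B_closed N psize hpre]
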